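-- pv_equiv track=rewrite | github.com/HalfCrafted/mindmap | pymindmap/layout.py | _compute_subtree_depth
-- ===== SOURCE A (Python) =====
-- from typing import Dict, Iterable, List, Optional, Set, Tuple
--
-- def _compute_subtree_depth(nid: int,
--                            children: Dict[int, Set[int]],
--                            out: Dict[int, int]) -> int:
--     kids = children.get(nid)
--     if not kids:
--         out[nid] = 0
--         return 0
--     best = 0
--     for c in kids:
--         best = max(best, _compute_subtree_depth(c, children, out) + 1)
--     out[nid] = best
--     return best
-- ===== SOURCE B (Python) =====
-- # Return-value re-implementation: level-by-level frontier expansion (BFS levels)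
-- # instead of recursion; the subtree depth is the number of non-empty frontiers
-- # minus one.  NOTE: unlike A, B does not populate the `out` memo dict; the
-- # equivalence claimed is about the RETURN value only.
-- def _compute_subtree_depth(nid, children, out):
--     depth = -1
--     frontier = [nid]
--     while frontier:
--         depth += 1
--         frontier = [c for m in frontier for c in (children.get(m) or ())]
--     return depth
-- ===== Notes on version B (the rewrite author's own statement) =====
-- stated objective: alternative
-- what changed: Replaces the recursive max-of-children depth computation by an iterative level-by-level frontier expansion: the depth is the number of non-empty frontiers minus one; B computes the return value only and does not populate the out memo dict.
import Mathlib
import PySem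

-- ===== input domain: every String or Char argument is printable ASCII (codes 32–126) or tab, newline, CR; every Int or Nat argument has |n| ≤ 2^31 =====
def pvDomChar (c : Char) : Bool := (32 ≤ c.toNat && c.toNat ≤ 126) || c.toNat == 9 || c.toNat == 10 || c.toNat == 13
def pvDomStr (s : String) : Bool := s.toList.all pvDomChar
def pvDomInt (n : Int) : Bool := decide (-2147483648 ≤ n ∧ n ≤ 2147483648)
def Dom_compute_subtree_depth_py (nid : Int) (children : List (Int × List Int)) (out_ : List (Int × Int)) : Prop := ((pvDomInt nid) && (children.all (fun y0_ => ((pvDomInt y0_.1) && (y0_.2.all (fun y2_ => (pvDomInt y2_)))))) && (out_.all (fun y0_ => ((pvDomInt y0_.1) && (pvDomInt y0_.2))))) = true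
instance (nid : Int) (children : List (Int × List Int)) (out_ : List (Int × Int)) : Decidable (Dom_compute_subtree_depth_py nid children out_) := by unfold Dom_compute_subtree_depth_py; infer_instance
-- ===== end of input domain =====

-- B recomputes only the RETURN value (the subtree depth); A additionally fills the `out`
-- memo dict in place — that side effect is not reproduced by B and not part of the claim.

-- ===== PORT A =====
-- A's recursion is not structurally terminating (it loops forever on a cycle reachable
-- from nid), so the port carries a fuel counter bounding the recursion DEPTH; under
-- Pre_ (no kid-chain from nid longer than the number of keys) the fuel is never exhausted.
-- The `out` dict is threaded faithfully even though A never reads it back.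
def pvARun (children : PySem.Dict Int (List Int)) : Nat → Int → PySem.Dict Int Int → Int × PySem.Dict Int Int
  | 0, _, d => (0, d)          -- fuel exhausted: unreachable under Pre_
  | f + 1, nid, d =>
    match children.get? nid with
    | none => (0, d.insert nid 0)                 -- `if not kids` (None)
    | some ks =>
      if ks = [] then (0, d.insert nid 0)         -- `if not kids` (empty set)
      else
        let r := ks.foldl (fun bd c =>
          let rc := pvARun children f c bd.2
          (max bd.1 (rc.1 + 1), rc.2)) (0, d)     -- best = max(best, rec(c)+1)
        (r.1, r.2.insert nid r.1)

def compute_subtree_depth_py (nid : Int) (children : List (Int × List Int)) (out_ : List (Int × Int)) : Int :=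
  (pvARun (PySem.Dict.ofList children) (children.length + 1) nid (PySem.Dict.ofList out_)).1

-- ===== PORT B =====
-- B's while loop: fuel bounds the number of iterations (depth+2 iterations happen;
-- under Pre_ the depth is at most the number of keys, so the fuel suffices).
def pvBLoop (children : PySem.Dict Int (List Int)) : Nat → Int → List Int → Int
  | 0, d, _ => d               -- fuel exhausted: unreachable under Pre_
  | f + 1, d, s =>
    if s = [] then d
    else pvBLoop children f (d + 1) (s.flatMap (fun m => (children.get? m).getD []))

def compute_subtree_depth_py_alt (nid : Int) (children : List (Int × List Int)) (out_ : List (Int × Int)) : Int :=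
  pvBLoop (PySem.Dict.ofList children) (children.length + 2) (-1) [nid]

-- ===== PRECONDITION & SPEC =====
-- helpers for Pre_: the kid list of a node, and `pvLong k n` = "some kid-chain of
-- length k starts at n" (a plain graph property of the input, not either algorithm).
def pvKids (children : List (Int × List Int)) (n : Int) : List Int :=
  ((PySem.Dict.ofList children).get? n).getD []

def pvLong (children : List (Int × List Int)) : Nat → Int → Bool
  | 0, _ => true
  | k + 1, n => (pvKids children n).any (pvLong children k)

-- Pre_ excludes exactly the inputs on which a cycle is reachable from nid (equivalently:
-- a kid-chain from nid longer than the number of keys exists); there Python A never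
-- returns (infinite recursion / RecursionError) and Python B loops forever as well.
def Pre_compute_subtree_depth_py (nid : Int) (children : List (Int × List Int)) (out_ : List (Int × Int)) : Prop :=
  pvLong children (children.length + 1) nid = false
instance (nid : Int) (children : List (Int × List Int)) (out_ : List (Int × Int)) : Decidable (Pre_compute_subtree_depth_py nid children out_) := by unfold Pre_compute_subtree_depth_py; infer_instance

def pvWitness_compute_subtree_depth_py : Int × (List (Int × List Int)) × (List (Int × Int)) :=
  (1, [(1, [2, 3]), (2, [3])], [(7, 9)])

def Spec_compute_subtree_depth_py (nid : Int) (children : List (Int × List Int)) (out_ : List (Int × Int)) (out : Int) : Prop := out = compute_subtree_depth_py_alt nid children out_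
instance (nid : Int) (children : List (Int × List Int)) (out_ : List (Int × Int)) (out : Int) : Decidable (Spec_compute_subtree_depth_py nid children out_ out) := by unfold Spec_compute_subtree_depth_py; infer_instance

-- ===== CLAIM (what is proved, stated in full; the proofs are below) =====
def Claim_equal_compute_subtree_depth_py : Prop := ∀ (nid : Int) (children : List (Int × List Int)) (out_ : List (Int × Int)), Dom_compute_subtree_depth_py nid children out_ → Pre_compute_subtree_depth_py nid children out_ → Spec_compute_subtree_depth_py nid children out_ (compute_subtree_depth_py nid children out_)

-- ===== LEMMAS AND PROOFS =====

-- pure shadow of A's recursion (ignoring the threaded dict)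
def pvSpec (children : List (Int × List Int)) : Nat → Int → Int
  | 0, _ => 0
  | f + 1, n =>
    if pvKids children n = [] then 0
    else (pvKids children n).foldl (fun b c => max b (pvSpec children f c + 1)) 0

theorem pvFoldMax_ge_init {α : Type} (g : α → Int) (l : List α) (b : Int) :
    b ≤ l.foldl (fun b c => max b (g c)) b := by
  induction l generalizing b with
  | nil => simp
  | cons x xs ih => exact le_trans (le_max_left _ _) (ih (max b (g x)))

theorem pvFoldMax_ge_mem {α : Type} (g : α → Int) (l : List α) {x : α} :
    ∀ (b : Int), x ∈ l → g x ≤ l.foldl (fun b c => max b (g c)) b := by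
  induction l with
  | nil => intro b hx; cases hx
  | cons y ys ih =>
    intro b hx
    rcases List.mem_cons.mp hx with h | h
    · subst h; exact le_trans (le_max_right _ _) (pvFoldMax_ge_init g ys _)
    · exact ih _ h

theorem pvFoldMax_attained {α : Type} (g : α → Int) (l : List α) (b : Int) :
    l.foldl (fun b c => max b (g c)) b = b ∨ ∃ x ∈ l, l.foldl (fun b c => max b (g c)) b = g x := by
  induction l generalizing b with
  | nil => left; rfl
  | cons y ys ih =>
    rcases ih (max b (g y)) with h | ⟨x, hx, h⟩
    · by_cases hb : g y ≤ b
      · left; simpa [List.foldl, max_eq_left hb] using h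
      · right; exact ⟨y, List.mem_cons_self, by simpa [List.foldl, max_eq_right (not_le.mp hb).le] using h⟩
    · right; exact ⟨x, List.mem_cons_of_mem _ hx, h⟩

theorem pvSpec_nonneg (children : List (Int × List Int)) (f : Nat) (n : Int) :
    0 ≤ pvSpec children f n := by
  cases f with
  | zero => simp [pvSpec]
  | succ f =>
    unfold pvSpec
    split
    · exact le_refl 0
    · exact pvFoldMax_ge_init _ _ 0

-- A's recursion result is pvSpec (the dict never feeds back into the value)
theorem pvARun_fst (children : List (Int × List Int)) (f : Nat) (n : Int) (d : PySem.Dict Int Int) :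
    (pvARun (PySem.Dict.ofList children) f n d).1 = pvSpec children f n := by
  induction f generalizing n d with
  | zero => rfl
  | succ f ih =>
    have hfold : ∀ (ks : List Int) (b : Int) (d : PySem.Dict Int Int),
        (ks.foldl (fun bd c =>
          let rc := pvARun (PySem.Dict.ofList children) f c bd.2
          (max bd.1 (rc.1 + 1), rc.2)) (b, d)).1
        = ks.foldl (fun b c => max b (pvSpec children f c + 1)) b := by
      intro ks
      induction ks with
      | nil => intro b d; rfl
      | cons x xs ihk => intro b d; simpa [List.foldl, ih] using ihk _ _
    unfold pvARun
    unfold pvKids at *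
    cases hg : (PySem.Dict.ofList children).get? n with
    | none => simp [pvSpec, pvKids, hg]
    | some ks =>
      by_cases hk : ks = []
      · simp [pvSpec, pvKids, hg, hk]
      · simp only [pvSpec, pvKids, hg, hk, Option.getD_some]
        exact hfold ks 0 d

-- pvSpec attains a chain length: spec value is a chain length ≤ fuel
theorem pvSpec_long (children : List (Int × List Int)) (f : Nat) (n : Int) :
    ∃ k : Nat, pvSpec children f n = (k : Int) ∧ pvLong children k n = true ∧ k ≤ f := by
  induction f generalizing n with
  | zero => exact ⟨0, rfl, rfl, le_refl 0⟩
  | succ f ih =>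
    unfold pvSpec
    by_cases hk : pvKids children n = []
    · exact ⟨0, by simp [hk], rfl, Nat.zero_le _⟩
    · simp only [if_neg hk]
      rcases pvFoldMax_attained (fun c => pvSpec children f c + 1) (pvKids children n) 0 with h | ⟨c, hc, h⟩
      · exact ⟨0, h, rfl, Nat.zero_le _⟩
      · rcases ih c with ⟨k, hk1, hk2, hk3⟩
        refine ⟨k + 1, by rw [h, hk1]; push_cast; ring, ?_, by omega⟩
        simp only [pvLong, List.any_eq_true]
        exact ⟨c, hc, hk2⟩

-- every chain length ≤ fuel is a lower bound on pvSpec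
theorem pvLong_le_spec (children : List (Int × List Int)) (k : Nat) :
    ∀ (f : Nat) (n : Int), k ≤ f → pvLong children k n = true → (k : Int) ≤ pvSpec children f n := by
  induction k with
  | zero => intro f n _ _; exact pvSpec_nonneg children f n
  | succ k ih =>
    intro f n hf hl
    obtain ⟨f', rfl⟩ : ∃ f', f = f' + 1 := ⟨f - 1, by omega⟩
    simp only [pvLong, List.any_eq_true] at hl
    obtain ⟨c, hc, hl⟩ := hl
    have hne : pvKids children n ≠ [] := by intro h; rw [h] at hc; cases hc
    have hmem : pvSpec children f' c + 1
        ≤ (pvKids children n).foldl (fun b c => max b (pvSpec children f' c + 1)) 0 :=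
      pvFoldMax_ge_mem (fun c => pvSpec children f' c + 1) (pvKids children n) 0 hc
    have hrec := ih f' c (by omega) hl
    unfold pvSpec
    rw [if_neg hne]
    push_cast
    omega

-- B's loop adds an iteration count to d
def pvCnt (children : List (Int × List Int)) : Nat → List Int → Nat
  | 0, _ => 0
  | f + 1, s => if s = [] then 0 else pvCnt children f (s.flatMap (pvKids children)) + 1

theorem pvBLoop_eq_cnt (children : List (Int × List Int)) (f : Nat) (d : Int) (s : List Int) :
    pvBLoop (PySem.Dict.ofList children) f d s = d + (pvCnt children f s : Int) := by
  induction f generalizing d s with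
  | zero => simp [pvBLoop, pvCnt]
  | succ f ih =>
    by_cases hs : s = []
    · simp [pvBLoop, pvCnt, hs]
    · simp only [pvBLoop, pvCnt, if_neg hs, ih]
      have : (fun m => ((PySem.Dict.ofList children).get? m).getD []) = pvKids children := rfl
      rw [this]
      push_cast
      ring

-- a frontier contains a chain of length k iff some member starts one
theorem pvAny_flat (children : List (Int × List Int)) (k : Nat) (s : List Int) :
    (s.flatMap (pvKids children)).any (pvLong children k) = s.any (pvLong children (k + 1)) := by
  simp [List.any_flatMap, pvLong]

theorem pvCnt_ge (children : List (Int × List Int)) (k : Nat) :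
    ∀ (f : Nat) (s : List Int), k < f → s.any (pvLong children k) = true → k + 1 ≤ pvCnt children f s := by
  induction k with
  | zero =>
    intro f s hf hl
    obtain ⟨f', rfl⟩ : ∃ f', f = f' + 1 := ⟨f - 1, by omega⟩
    have hs : s ≠ [] := by intro h; subst h; simp at hl
    simp [pvCnt, hs]
  | succ k ih =>
    intro f s hf hl
    obtain ⟨f', rfl⟩ : ∃ f', f = f' + 1 := ⟨f - 1, by omega⟩
    have hs : s ≠ [] := by intro h; subst h; simp at hl
    have hl' : (s.flatMap (pvKids children)).any (pvLong children k) = true := by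
      rw [pvAny_flat]; exact hl
    have := ih f' (s.flatMap (pvKids children)) (by omega) hl'
    simp only [pvCnt, if_neg hs]
    omega

theorem pvCnt_le (children : List (Int × List Int)) (k : Nat) :
    ∀ (f : Nat) (s : List Int), s.any (pvLong children k) = false → pvCnt children f s ≤ k := by
  induction k with
  | zero =>
    intro f s hl
    have hs : s = [] := by
      cases s with
      | nil => rfl
      | cons x xs => simp [pvLong] at hl
    cases f <;> simp [pvCnt, hs]
  | succ k ih =>
    intro f s hl
    cases f with
    | zero => simp [pvCnt]
    | succ f =>
      by_cases hs : s = []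
      · simp [pvCnt, hs]
      · have hl' : (s.flatMap (pvKids children)).any (pvLong children k) = false := by
          rw [pvAny_flat]; exact hl
        have := ih f (s.flatMap (pvKids children)) hl'
        simp only [pvCnt, if_neg hs]
        omega

-- ===== VERDICT (by name: the statement is the Claim_ definition above) =====
theorem compute_subtree_depth_py_spec : Claim_equal_compute_subtree_depth_py := by
  intro nid children out_ _ hpre
  unfold Spec_compute_subtree_depth_py
  unfold Pre_compute_subtree_depth_py at hpre
  set N := children.length with hN
  -- A's value
  have hA : compute_subtree_depth_py nid children out_ = pvSpec children (N + 1) nid := by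
    unfold compute_subtree_depth_py
    exact pvARun_fst children (N + 1) nid _
  -- characterize A's value as the longest chain length K from nid
  obtain ⟨K, hK1, hK2, hK3⟩ := pvSpec_long children (N + 1) nid
  have hKN : K ≤ N := by
    rcases Nat.lt_or_ge K (N + 1) with h | h
    · omega
    · exfalso
      have : K = N + 1 := by omega
      rw [this] at hK2
      rw [hK2] at hpre
      cases hpre
  have hKsucc : pvLong children (K + 1) nid = false := by
    by_contra h
    have h' : pvLong children (K + 1) nid = true := by
      cases hb : pvLong children (K + 1) nid
      · exact absurd hb h
      · rfl
    have := pvLong_le_spec children (K + 1) (N + 1) nid (by omega) h'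
    rw [hK1] at this
    push_cast at this
    omega
  -- B's value: (-1) + pvCnt (N+2) [nid], and pvCnt (N+2) [nid] = K + 1
  have hanyK : [nid].any (pvLong children K) = true := by simp [hK2]
  have hanyK1 : [nid].any (pvLong children (K + 1)) = false := by simp [hKsucc]
  have hlo := pvCnt_ge children K (N + 2) [nid] (by omega) hanyK
  have hhi := pvCnt_le children (K + 1) (N + 2) [nid] hanyK1
  have hcnt : pvCnt children (N + 2) [nid] = K + 1 := by omega
  unfold compute_subtree_depth_py_alt
  rw [pvBLoop_eq_cnt children (N + 2) (-1) [nid], hcnt, hA, hK1]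
  push_cast
  ring
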